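-- pv_equiv track=rewrite | github.com/TJKkking/agentrun-sdk-python | agentrun/utils/ram_signature/signer.py | _canonical_headers
-- ===== SOURCE A (Python) =====
-- def _get_signed_headers(headers: dict) -> list[str]:
--     """与 http-auth-acs 一致：仅签 x-acs-*、host、content-type，且 value 非 None。"""
--     out = set()
--     for key, value in headers.items():
--         lower_key = key.lower().strip()
--         if value is not None and (
--             lower_key.startswith("x-acs-")
--             or lower_key == "host"
--             or lower_key == "content-type"
--         ):
--             out.add(lower_key)
--     return sorted(out)
--
-- def _canonical_headers(headers: dict) -> tuple[str, str]:
--     """与 http-auth-acs 一致：先归一化再按 signed_headers 顺序输出 header:value\\n。"""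
--     new_headers: dict[str, str] = {}
--     for k, v in headers.items():
--         lower_key = k.lower().strip()
--         if v is not None:
--             new_headers[lower_key] = str(v).strip()
--     signed_list = _get_signed_headers(headers)
--     canonical = "".join(f"{h}:{new_headers[h]}\n" for h in signed_list)
--     signed_str = ";".join(signed_list)
--     return canonical, signed_str
-- ===== SOURCE B (Python) =====
-- def _canonical_headers(headers: dict) -> tuple[str, str]:
--     # No dict of normalized headers at all: normalize the pairs once, take the
--     # sorted set of signed keys, and find each key's value by scanning the
--     # pairs BACKWARDS (the last non-None occurrence is the first one found).
--     pairs = [(k.lower().strip(), v) for k, v in headers.items()]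
--     keys = sorted({lk for lk, v in pairs
--                    if v is not None and (lk.startswith("x-acs-")
--                                          or lk == "host"
--                                          or lk == "content-type")})
--
--     def _last_value(h: str) -> str:
--         for lk, v in reversed(pairs):
--             if lk == h and v is not None:
--                 return str(v).strip()
--
--     canonical = "".join(f"{h}:{_last_value(h)}\n" for h in keys)
--     return canonical, ";".join(keys)
-- ===== Notes on version B (the rewrite author's own statement) =====
-- stated objective: alternative
-- what changed: B maintains no normalized dict and no separate signed set: it normalizes the pairs once, takes the sorted set-comprehension of signed keys, and retrieves each key's value by a backward scan of the pairs (last non-None occurrence is the first found), trading A's O(n) dict bookkeeping for an O(s*n) scan per signed key.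
import Mathlib
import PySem

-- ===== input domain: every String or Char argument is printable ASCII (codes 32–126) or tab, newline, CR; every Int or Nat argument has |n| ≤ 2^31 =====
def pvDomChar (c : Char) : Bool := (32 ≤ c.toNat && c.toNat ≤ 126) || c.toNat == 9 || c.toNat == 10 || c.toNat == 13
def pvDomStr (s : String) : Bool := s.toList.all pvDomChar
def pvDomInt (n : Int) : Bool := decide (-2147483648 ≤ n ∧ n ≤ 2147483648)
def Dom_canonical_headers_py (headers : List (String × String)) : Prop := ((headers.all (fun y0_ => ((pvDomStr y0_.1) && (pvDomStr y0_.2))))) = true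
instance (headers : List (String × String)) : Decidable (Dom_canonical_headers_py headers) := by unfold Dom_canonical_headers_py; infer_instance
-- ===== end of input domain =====

-- B replaces A's normalized dict + second-pass signed set by a sorted set comprehension plus a backward scan per signed key (objective: alternative; return value only — neither mutates).


-- ===== PORT A =====
-- _get_signed_headers: values are str under the type convention, so 'value is not None' is always true and is dropped.
def get_signed_headers_py (headers : List (String × String)) : List String :=
  let out := headers.foldl
    (fun out kv =>
      let lower_key := PySem.Str.strip (PySem.Str.lower kv.1)
      if PySem.Str.startswith lower_key "x-acs-" || lower_key == "host" || lower_key == "content-type"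
      then PySem.Set.add out lower_key else out)
    PySem.Set.empty
  PySem.List.sorted out (fun x => x) false

-- _canonical_headers: 'v is not None' always true (str values); new_headers[h] cannot KeyError
-- (every signed key was inserted in the first loop), ported as getD with an unused default;
-- the f-string is ported as PySem.Str.join "" (exact concatenation).
def canonical_headers_py (headers : List (String × String)) : String × String :=
  let new_headers := headers.foldl
    (fun d kv => d.insert (PySem.Str.strip (PySem.Str.lower kv.1)) (PySem.Str.strip kv.2))
    PySem.Dict.empty
  let signed_list := get_signed_headers_py headers
  let canonical := PySem.Str.join ""
    (signed_list.map (fun h => PySem.Str.join "" [h, ":", new_headers.getD h "", "\n"]))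
  let signed_str := PySem.Str.join ";" signed_list
  (canonical, signed_str)

-- ===== PORT B =====
-- _last_value: the backward 'for … return' over reversed(pairs) is .reverse.find?;
-- the 'v is not None' test is always true (str values); the implicit-None fallthrough is
-- unreachable (h is drawn from the signed keys of pairs), ported as "".
def last_value_py (pairs : List (String × String)) (h : String) : String :=
  match pairs.reverse.find? (fun p => p.1 == h) with
  | some p => PySem.Str.strip p.2
  | none => ""

-- set comprehension over pairs = PySem.Set.ofList of the filtered projection.
def canonical_headers_py_alt (headers : List (String × String)) : String × String :=
  let pairs := headers.map (fun kv => (PySem.Str.strip (PySem.Str.lower kv.1), kv.2))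
  let keys := PySem.List.sorted
      (PySem.Set.ofList (pairs.filterMap (fun p =>
        if PySem.Str.startswith p.1 "x-acs-" || p.1 == "host" || p.1 == "content-type"
        then some p.1 else none)))
      (fun x => x) false
  let canonical := PySem.Str.join "" (keys.map (fun h =>
      PySem.Str.join "" [h, ":", last_value_py pairs h, "\n"]))
  (canonical, PySem.Str.join ";" keys)

-- ===== PRECONDITION & SPEC =====
def Spec_canonical_headers_py (headers : List (String × String)) (out : String × String) : Prop := out = canonical_headers_py_alt headers
instance (headers : List (String × String)) (out : String × String) : Decidable (Spec_canonical_headers_py headers out) := by unfold Spec_canonical_headers_py; infer_instance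

-- ===== CLAIM (what is proved, stated in full; the proofs are below) =====
def Claim_equal_canonical_headers_py : Prop := ∀ (headers : List (String × String)), Dom_canonical_headers_py headers → Spec_canonical_headers_py headers (canonical_headers_py headers)

-- ===== LEMMAS AND PROOFS =====

-- A's conditional set-building fold IS the fold of Set.add over B's filtered projection.
theorem set_fold_eq_filterMap_fold (hs : List (String × String)) :
    ∀ (s : PySem.Set String),
      hs.foldl (fun out kv =>
        let lower_key := PySem.Str.strip (PySem.Str.lower kv.1)
        if PySem.Str.startswith lower_key "x-acs-" || lower_key == "host" || lower_key == "content-type"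
        then PySem.Set.add out lower_key else out) s
      = ((hs.map (fun kv => (PySem.Str.strip (PySem.Str.lower kv.1), kv.2))).filterMap
          (fun p => if PySem.Str.startswith p.1 "x-acs-" || p.1 == "host" || p.1 == "content-type"
                    then some p.1 else none)).foldl PySem.Set.add s := by
  induction hs with
  | nil => intro s; rfl
  | cons kv tl ih =>
    intro s
    simp only [List.foldl_cons, List.map_cons, List.filterMap_cons]
    by_cases hc : (PySem.Str.startswith (PySem.Str.strip (PySem.Str.lower kv.1)) "x-acs-"
        || PySem.Str.strip (PySem.Str.lower kv.1) == "host"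
        || PySem.Str.strip (PySem.Str.lower kv.1) == "content-type") = true
    · simp only [hc, if_pos, List.foldl_cons]; exact ih _
    · simp only [Bool.not_eq_true] at hc
      simp only [hc, Bool.false_eq_true, if_false]; exact ih _

-- A's dict lookup after the insert fold equals the first match in the REVERSED normalized pairs.
theorem getD_foldl_insert_eq_rev_find (hs : List (String × String)) :
    ∀ (d : PySem.Dict String String) (h x : String),
      (hs.foldl (fun d kv => d.insert (PySem.Str.strip (PySem.Str.lower kv.1)) (PySem.Str.strip kv.2)) d).getD h x
      = match ((hs.map (fun kv => (PySem.Str.strip (PySem.Str.lower kv.1), kv.2))).reverse.find?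
               (fun p => p.1 == h)) with
        | some p => PySem.Str.strip p.2
        | none => d.getD h x := by
  induction hs with
  | nil => intro d h x; rfl
  | cons kv tl ih =>
    intro d h x
    simp only [List.foldl_cons, List.map_cons, List.reverse_cons, List.find?_append]
    rw [ih]
    cases hfind : ((tl.map (fun kv => (PySem.Str.strip (PySem.Str.lower kv.1), kv.2))).reverse.find?
        (fun p => p.1 == h)) with
    | some p => simp
    | none =>
      simp only [Option.none_or]
      by_cases heq : PySem.Str.strip (PySem.Str.lower kv.1) = h
      · subst heq
        simp [List.find?, PySem.Dict.getD_insert_self]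
      · have hb : ((PySem.Str.strip (PySem.Str.lower kv.1), kv.2).1 == h) = false := by
          simpa using heq
        simp only [List.find?, hb]
        rw [PySem.Dict.getD_insert_of_ne _ _ _ (fun he => heq he.symm)]

-- ===== VERDICT (by name: the statement is the Claim_ definition above) =====
theorem canonical_headers_py_spec : Claim_equal_canonical_headers_py := by
  intro headers _
  unfold Spec_canonical_headers_py
  simp only [canonical_headers_py, canonical_headers_py_alt, get_signed_headers_py]
  rw [set_fold_eq_filterMap_fold headers PySem.Set.empty]
  have hset : ∀ xs : List String, List.foldl PySem.Set.add PySem.Set.empty xs = PySem.Set.ofList xs :=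
    fun xs => (PySem.Set.ofList_eq_foldl xs).symm
  simp only [hset]
  refine Prod.ext ?_ rfl
  refine congrArg (PySem.Str.join "") (List.map_congr_left ?_)
  intro h _
  refine congrArg (fun v => PySem.Str.join "" [h, ":", v, "\n"]) ?_
  rw [getD_foldl_insert_eq_rev_find headers PySem.Dict.empty h ""]
  rfl
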